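-- pv_equiv track=rewrite | github.com/Garima-Patidar/Myscheduleplanner | my_schedule_planner/app.py | split_large_topic
-- ===== SOURCE A (Python) =====
-- def split_large_topic(topic: str) -> list[str]:
--     # long lines ko smaller chunks me todne ke liye
--     separators = [';', ':', ' and ', ' & ', ',']
--     results = [topic]
--
--     for sep in separators:
--         temp = []
--         for item in results:
--             if len(item) > 55 and sep in item:
--                 temp.extend([x.strip() for x in item.split(sep) if x.strip()])
--             else:
--                 temp.append(item)
--         results = temp
--
--     final = []
--     seen = set()
--     for item in results:
--         item = item.strip(' -•')
--         if len(item) >= 3 and item.lower() not in seen: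
--             final.append(item)
--             seen.add(item.lower())
--     return final
-- ===== SOURCE B (Python) =====
-- def split_large_topic(topic: str) -> list[str]:
--     separators = [';', ':', ' and ', ' & ', ',']
--
--     def _chunks(s, i):
--         # depth-first: push one string through the remaining separators
--         if i == len(separators):
--             return [s]
--         sep = separators[i]
--         if len(s) > 55 and sep in s:
--             out = []
--             for x in s.split(sep):
--                 piece = x.strip()
--                 if piece:
--                     out.extend(_chunks(piece, i + 1))
--             return out
--         return _chunks(s, i + 1)
--
--     result = {}
--     for item in _chunks(topic, 0):
--         t = item.strip(' -•')
--         if len(t) >= 3: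
--             result.setdefault(t.lower(), t)
--     return list(result.values())
-- ===== Notes on version B (the rewrite author's own statement) =====
-- stated objective: alternative
-- what changed: A's five sequential full-list passes (one per separator) are replaced by a depth-first recursion that pushes each string through the remaining separators, and the final case-insensitive dedup loop with an auxiliary seen-set is replaced by an insertion-ordered dict keyed by the lowercased chunk, returning its values.
import Mathlib
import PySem

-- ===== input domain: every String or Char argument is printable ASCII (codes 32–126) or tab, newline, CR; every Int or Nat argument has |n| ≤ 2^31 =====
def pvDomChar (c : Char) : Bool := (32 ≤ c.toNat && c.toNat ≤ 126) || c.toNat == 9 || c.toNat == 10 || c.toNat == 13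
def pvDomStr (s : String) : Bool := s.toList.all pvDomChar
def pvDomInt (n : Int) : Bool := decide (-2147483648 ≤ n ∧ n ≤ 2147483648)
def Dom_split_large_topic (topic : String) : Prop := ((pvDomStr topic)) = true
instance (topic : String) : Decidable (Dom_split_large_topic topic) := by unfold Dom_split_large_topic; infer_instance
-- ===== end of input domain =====

-- B replaces A's five full-list passes (one per separator) by a depth-first recursion pushing each
-- string through the remaining separators, and dedups via an insertion-ordered dict keyed by the
-- lowercased chunk (objective: alternative decomposition, same cost).

-- s.split(sep) for a NONEMPTY separator (all separators here are nonempty literals);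
-- exact: PySem.Chars.splitOn is Python's str.split for sep ≠ ""
def pySplit (s sep : String) : List String :=
  (PySem.Chars.splitOn s.toList sep.toList).map String.ofList

-- ===== PORT A =====
def pvSeps : List String := [";", ":", " and ", " & ", ","]

-- one pass of A's outer loop: rebuild `results` for one separator
def pvStepA (results : List String) (sep : String) : List String :=
  results.foldl
    (fun temp item =>
      if 55 < PySem.Str.len item && PySem.Str.isIn sep item then
        temp ++ (((pySplit item sep).filter
                    (fun x => PySem.Str.strip x ≠ "")).map PySem.Str.strip)
      else
        temp ++ [item]) []

-- A's final dedup loop, state = (final, seen)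
def pvDedupA (results : List String) : List String :=
  (results.foldl
    (fun (st : List String × PySem.Set String) item0 =>
      let item := PySem.Str.stripChars item0 " -•"
      if 3 ≤ PySem.Str.len item && !(PySem.Set.contains st.2 (PySem.Str.lower item)) then
        (st.1 ++ [item], PySem.Set.add st.2 (PySem.Str.lower item))
      else st) ([], PySem.Set.empty)).1

def split_large_topic (topic : String) : List String :=
  pvDedupA (pvSeps.foldl pvStepA [topic])

-- ===== PORT B =====
-- `_chunks(s, i)`: push s depth-first through the remaining separators
def pvChunksB : List String → String → List String
  | [], s => [s]
  | sep :: rest, s =>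
      if 55 < PySem.Str.len s && PySem.Str.isIn sep s then
        (((pySplit s sep).filter
            (fun x => PySem.Str.strip x ≠ "")).map PySem.Str.strip).foldl
          (fun out piece => out ++ pvChunksB rest piece) []
      else pvChunksB rest s

def split_large_topic_alt (topic : String) : List String :=
  ((pvChunksB pvSeps topic).foldl
    (fun (result : PySem.Dict String String) item =>
      let t := PySem.Str.stripChars item " -•"
      if 3 ≤ PySem.Str.len t then
        result.setdefault (PySem.Str.lower t) t
      else result) PySem.Dict.empty).values

-- ===== PRECONDITION & SPEC =====
def Spec_split_large_topic (topic : String) (out : List String) : Prop := out = split_large_topic_alt topic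
instance (topic : String) (out : List String) : Decidable (Spec_split_large_topic topic out) := by unfold Spec_split_large_topic; infer_instance

-- ===== CLAIM (what is proved, stated in full; the proofs are below) =====
def Claim_equal_split_large_topic : Prop := ∀ (topic : String), Dom_split_large_topic topic → Spec_split_large_topic topic (split_large_topic topic)

-- ===== LEMMAS AND PROOFS =====

-- the per-item effect of one of A's passes
def pvG (sep item : String) : List String :=
  if 55 < PySem.Str.len item && PySem.Str.isIn sep item then
    ((pySplit item sep).filter (fun x => PySem.Str.strip x ≠ "")).map PySem.Str.strip
  else [item]

theorem pvStepA_eq_flatMap (results : List String) (sep : String) :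
    pvStepA results sep = results.flatMap (pvG sep) := by
  unfold pvStepA
  have h : (fun (temp : List String) item =>
      if 55 < PySem.Str.len item && PySem.Str.isIn sep item then
        temp ++ (((pySplit item sep).filter
                    (fun x => PySem.Str.strip x ≠ "")).map PySem.Str.strip)
      else temp ++ [item]) = fun temp item => temp ++ pvG sep item := by
    funext temp item
    unfold pvG
    split <;> rfl
  rw [h]
  simpa using PySem.List.foldl_append_eq_flatMap (pvG sep) results []

theorem pvChunksB_cons (sep : String) (rest : List String) (s : String) :
    pvChunksB (sep :: rest) s = (pvG sep s).flatMap (pvChunksB rest) := by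
  unfold pvChunksB pvG
  split_ifs with h
  · rw [PySem.List.foldl_append_eq_flatMap]
    simp only [List.nil_append]
  · simp

theorem pvPasses_eq_chunks (seps : List String) :
    ∀ L : List String, seps.foldl pvStepA L = L.flatMap (pvChunksB seps) := by
  induction seps with
  | nil => intro L; simp [pvChunksB]
  | cons sep rest ih =>
      intro L
      have h0 : List.foldl pvStepA L (sep :: rest) = rest.foldl pvStepA (pvStepA L sep) := rfl
      rw [h0, ih, pvStepA_eq_flatMap, List.flatMap_assoc]
      congr 1
      funext s
      rw [pvChunksB_cons]

-- the list of values A's dedup loop appends, as a function of the seen-keys list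
def pvAdded : List String → List String → List String
  | [], _ => []
  | item0 :: rest, seen =>
      let t := PySem.Str.stripChars item0 " -•"
      if 3 ≤ PySem.Str.len t ∧ PySem.Str.lower t ∉ seen then
        t :: pvAdded rest (seen ++ [PySem.Str.lower t])
      else pvAdded rest seen

theorem pvDedupA_loop (items : List String) :
    ∀ (out seen : List String),
      (items.foldl
        (fun (st : List String × PySem.Set String) item0 =>
          let item := PySem.Str.stripChars item0 " -•"
          if 3 ≤ PySem.Str.len item && !(PySem.Set.contains st.2 (PySem.Str.lower item)) then
            (st.1 ++ [item], PySem.Set.add st.2 (PySem.Str.lower item))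
          else st) (out, seen)).1 = out ++ pvAdded items seen := by
  induction items with
  | nil => intro out seen; simp [pvAdded]
  | cons item0 rest ih =>
      intro out seen
      simp only [List.foldl_cons, pvAdded]
      by_cases h3 : 3 ≤ PySem.Str.len (PySem.Str.stripChars item0 " -•")
      · by_cases hm : PySem.Str.lower (PySem.Str.stripChars item0 " -•") ∈ seen
        · have hc : PySem.Set.contains seen (PySem.Str.lower (PySem.Str.stripChars item0 " -•")) = true :=
            (PySem.Set.contains_iff seen _).mpr hm
          have hbf : ¬ ((decide (3 ≤ PySem.Str.len (PySem.Str.stripChars item0 " -•")) &&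
              !(PySem.Set.contains seen (PySem.Str.lower (PySem.Str.stripChars item0 " -•")))) = true) := by
            rw [Bool.and_eq_true, Bool.not_eq_true']
            rintro ⟨-, h2⟩
            rw [hc] at h2
            exact absurd h2 (by decide)
          rw [if_neg hbf,
              if_neg (c := 3 ≤ PySem.Str.len (PySem.Str.stripChars item0 " -•") ∧ PySem.Str.lower (PySem.Str.stripChars item0 " -•") ∉ seen)
                (fun hco => hco.2 hm)]
          exact ih out seen
        · have hc : PySem.Set.contains seen (PySem.Str.lower (PySem.Str.stripChars item0 " -•")) = false := by
            rw [Bool.eq_false_iff]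
            intro hx
            exact hm ((PySem.Set.contains_iff seen _).mp hx)
          have hbt : ((decide (3 ≤ PySem.Str.len (PySem.Str.stripChars item0 " -•")) &&
              !(PySem.Set.contains seen (PySem.Str.lower (PySem.Str.stripChars item0 " -•")))) = true) := by
            rw [Bool.and_eq_true, Bool.not_eq_true']
            exact ⟨decide_eq_true h3, hc⟩
          rw [if_pos hbt,
              if_pos (c := 3 ≤ PySem.Str.len (PySem.Str.stripChars item0 " -•") ∧ PySem.Str.lower (PySem.Str.stripChars item0 " -•") ∉ seen) ⟨h3, hm⟩,
              PySem.Set.add_of_not_mem hm, ih]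
          simp
      · have hbf : ¬ ((decide (3 ≤ PySem.Str.len (PySem.Str.stripChars item0 " -•")) &&
            !(PySem.Set.contains seen (PySem.Str.lower (PySem.Str.stripChars item0 " -•")))) = true) := by
          rw [Bool.and_eq_true]
          rintro ⟨h1, -⟩
          exact h3 (of_decide_eq_true h1)
        rw [if_neg hbf,
            if_neg (c := 3 ≤ PySem.Str.len (PySem.Str.stripChars item0 " -•") ∧ PySem.Str.lower (PySem.Str.stripChars item0 " -•") ∉ seen)
              (fun hco => h3 hco.1)]
        exact ih out seen

theorem pvDedupB_loop (items : List String) :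
    ∀ (d : PySem.Dict String String), d.keys.Nodup →
      ((items.foldl
        (fun (result : PySem.Dict String String) item =>
          let t := PySem.Str.stripChars item " -•"
          if 3 ≤ PySem.Str.len t then
            result.setdefault (PySem.Str.lower t) t
          else result) d)).values = d.values ++ pvAdded items d.keys := by
  induction items with
  | nil => intro d _; simp [pvAdded]
  | cons item0 rest ih =>
      intro d hd
      simp only [List.foldl_cons, pvAdded]
      by_cases h3 : 3 ≤ PySem.Str.len (PySem.Str.stripChars item0 " -•")
      · rw [if_pos (c := 3 ≤ PySem.Str.len (PySem.Str.stripChars item0 " -•")) h3]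
        by_cases hm : PySem.Str.lower (PySem.Str.stripChars item0 " -•") ∈ d.keys
        · have hc : d.contains (PySem.Str.lower (PySem.Str.stripChars item0 " -•")) = true :=
            (PySem.Dict.contains_iff_mem_keys d _).mpr hm
          rw [PySem.Dict.setdefault_of_contains d _ hc,
              if_neg (c := 3 ≤ PySem.Str.len (PySem.Str.stripChars item0 " -•") ∧ PySem.Str.lower (PySem.Str.stripChars item0 " -•") ∉ d.keys)
                (fun hco => hco.2 hm)]
          exact ih d hd
        · have hc : d.contains (PySem.Str.lower (PySem.Str.stripChars item0 " -•")) = false := by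
            rw [Bool.eq_false_iff]
            intro hx
            exact hm ((PySem.Dict.contains_iff_mem_keys d _).mp hx)
          rw [PySem.Dict.setdefault_of_not_contains d _ hc]
          have hkeys := PySem.Dict.keys_insert_of_not_contains d
            (k := PySem.Str.lower (PySem.Str.stripChars item0 " -•")) (PySem.Str.stripChars item0 " -•") hc
          have hvals : (d.insert (PySem.Str.lower (PySem.Str.stripChars item0 " -•")) (PySem.Str.stripChars item0 " -•")).values
              = d.values ++ [PySem.Str.stripChars item0 " -•"] := by
            simp only [PySem.Dict.values]
            rw [PySem.Dict.items_insert_of_not_contains d _ hc]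
            simp
          have hnd : (d.insert (PySem.Str.lower (PySem.Str.stripChars item0 " -•")) (PySem.Str.stripChars item0 " -•")).keys.Nodup := by
            rw [hkeys, List.nodup_append]
            refine ⟨hd, List.nodup_singleton _, ?_⟩
            intro a ha b hb he
            rw [List.mem_singleton] at hb
            subst hb
            exact hm (he ▸ ha)
          rw [ih _ hnd, hkeys, hvals,
              if_pos (c := 3 ≤ PySem.Str.len (PySem.Str.stripChars item0 " -•") ∧ PySem.Str.lower (PySem.Str.stripChars item0 " -•") ∉ d.keys) ⟨h3, hm⟩]
          simp
      · rw [if_neg (c := 3 ≤ PySem.Str.len (PySem.Str.stripChars item0 " -•")) h3,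
            if_neg (c := 3 ≤ PySem.Str.len (PySem.Str.stripChars item0 " -•") ∧ PySem.Str.lower (PySem.Str.stripChars item0 " -•") ∉ d.keys)
              (fun hco => h3 hco.1)]
        exact ih d hd

-- ===== VERDICT (by name: the statement is the Claim_ definition above) =====
theorem split_large_topic_spec : Claim_equal_split_large_topic := by
  intro topic _
  unfold Spec_split_large_topic split_large_topic split_large_topic_alt pvDedupA
  rw [pvPasses_eq_chunks]
  have hchunks : (([topic] : List String)).flatMap (pvChunksB pvSeps) = pvChunksB pvSeps topic := by
    simp
  rw [hchunks]
  rw [pvDedupA_loop, pvDedupB_loop _ PySem.Dict.empty (by simp [PySem.Dict.keys_empty])]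
  simp [PySem.Set.empty, PySem.Dict.values, PySem.Dict.empty]
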